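-- pv_equiv track=rewrite | github.com/iam52/coding_everyday | 프로그래머스/0/120830. 양꼬치/양꼬치.py | solution
-- ===== SOURCE A (Python) =====
-- def solution(n, k):
--     answer = 0
--     l = n * 12000
--
--     for i in range(1, n+1):
--         if i % 10 == 0:
--             k -= 1
--
--     answer = l + (k * 2000)
--     return answer
-- ===== SOURCE B (Python) =====
-- def solution(n, k):
--     # closed form: every 10th skewer gives one free sauce, so n//10 sauces are free
--     return n * 12000 + (k - n // 10) * 2000
-- ===== Notes on version B (the rewrite author's own statement) =====
-- stated objective: faster
-- what changed: replaces the O(n) loop counting multiples of 10 in 1..n by the closed form n//10, giving a single arithmetic expression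
-- outside the precondition, e.g. on solution(-5, 3): A returns -54000, B returns -52000
import Mathlib
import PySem

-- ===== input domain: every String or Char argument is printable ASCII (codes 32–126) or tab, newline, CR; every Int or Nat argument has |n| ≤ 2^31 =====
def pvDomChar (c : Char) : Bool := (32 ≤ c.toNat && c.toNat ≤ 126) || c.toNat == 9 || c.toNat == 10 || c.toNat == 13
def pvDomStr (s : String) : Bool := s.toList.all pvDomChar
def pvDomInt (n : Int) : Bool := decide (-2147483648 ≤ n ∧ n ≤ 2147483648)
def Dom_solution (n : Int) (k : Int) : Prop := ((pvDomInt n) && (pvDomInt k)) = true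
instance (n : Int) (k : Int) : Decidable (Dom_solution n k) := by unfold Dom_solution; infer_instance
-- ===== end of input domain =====

-- B replaces A's O(n) loop (counting multiples of 10 in 1..n) by the closed form n//10; faster (asymptotic).


-- ===== PORT A =====
def solution (n : Int) (k : Int) : Int :=
  let l := n * 12000
  let k' := (PySem.List.pyRange 1 (n + 1) 1).foldl
    (fun kk i => if PySem.Int.mod i 10 == 0 then kk - 1 else kk) k
  l + k' * 2000

-- ===== PORT B =====
def solution_alt (n : Int) (k : Int) : Int :=
  n * 12000 + (k - PySem.Int.floordiv n 10) * 2000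

-- ===== PRECONDITION & SPEC =====
-- Pre_ restricts to the natural domain of the problem (a count of skewers):
-- for negative n A's loop is empty (no discount) while B's n//10 is negative; neither value is specified there.
def Pre_solution (n : Int) (k : Int) : Prop := 0 ≤ n
instance (n : Int) (k : Int) : Decidable (Pre_solution n k) := by unfold Pre_solution; infer_instance
def pvWitness_solution : Int × Int := (10, 5)

def Spec_solution (n : Int) (k : Int) (out : Int) : Prop := out = solution_alt n k
instance (n : Int) (k : Int) (out : Int) : Decidable (Spec_solution n k out) := by unfold Spec_solution; infer_instance

-- ===== CLAIM (what is proved, stated in full; the proofs are below) =====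
def Claim_equal_solution : Prop := ∀ (n : Int) (k : Int), Dom_solution n k → Pre_solution n k → Spec_solution n k (solution n k)

-- ===== LEMMAS AND PROOFS =====
lemma fold_count (m : Nat) (k : Int) :
    ((List.range m).map (fun j : Nat => (1 : Int) + j)).foldl
      (fun kk i => if PySem.Int.mod i 10 == 0 then kk - 1 else kk) k
      = k - ((m / 10 : Nat) : Int) := by
  induction m generalizing k with
  | zero => simp
  | succ m ih =>
    rw [List.range_succ, List.map_append, List.foldl_append, ih]
    simp only [List.map_cons, List.map_nil, List.foldl_cons, List.foldl_nil]
    rw [PySem.Int.mod_eq_emod_of_pos (by norm_num)]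
    by_cases h : (m + 1) % 10 = 0
    · have h' : ((1 : Int) + m) % 10 = 0 := by omega
      simp only [h', beq_self_eq_true, if_true]
      have : (m + 1) / 10 = m / 10 + 1 := by omega
      rw [this]; push_cast; ring
    · have h' : ¬ ((1 : Int) + m) % 10 = 0 := by omega
      simp only [beq_iff_eq, h', if_false]
      have : (m + 1) / 10 = m / 10 := by omega
      rw [this]

-- ===== VERDICT (by name: the statement is the Claim_ definition above) =====
theorem solution_spec : Claim_equal_solution := by
  intro n k _ hpre
  unfold Spec_solution solution solution_alt
  rw [PySem.List.pyRange_one]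
  have hn : ((n.toNat : Int)) = n := Int.toNat_of_nonneg hpre
  have : ((n + 1 - 1).toNat) = n.toNat := by omega
  rw [this, fold_count]
  rw [PySem.Int.floordiv_eq_ediv_of_pos (by norm_num)]
  have : ((n.toNat / 10 : Nat) : Int) = n / 10 := by
    omega
  rw [this]
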